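-- pv_equiv track=rewrite | github.com/PD758/PeerPipe | server/protocol.py | check_roomname
-- ===== SOURCE A (Python) =====
-- import string
--
-- _ALLOWED_CHARS = frozenset(string.ascii_letters + string.digits + "_+-=/ $%#@!?,;()[]")
--
-- def check_roomname(name: str|None) -> str|None:
--     if name is None:
--         return None
--     if not (4 <= len(name) <= 48):
--         return None
--     if not all(c in _ALLOWED_CHARS for c in name):
--         return None
--     return name
-- ===== SOURCE B (Python) =====
-- _PUNCT = "_+-=/ $%#@!?,;()[]"
--
-- def _consume(name, i):
--     # recursive DFA: position i already validated
--     if i == len(name):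
--         return name if 4 <= i <= 48 else None
--     c = name[i]
--     if ('a' <= c <= 'z') or ('A' <= c <= 'Z') or ('0' <= c <= '9') or c in _PUNCT:
--         return _consume(name, i + 1) if i < 48 else None
--     return None
--
-- def check_roomname(name):
--     if name is None:
--         return None
--     return _consume(name, 0)
-- ===== Notes on version B (the rewrite author's own statement) =====
-- stated objective: alternative
-- what changed: B replaces A's staged checks (length comparison, then an all()-membership scan against a precomputed frozenset) with a single recursive DFA that walks the string once, classifying each character by ASCII range comparisons plus a small punctuation string, bailing out as soon as position 48 is passed, and deciding the length lower bound only at the end of the string.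
import Mathlib
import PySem

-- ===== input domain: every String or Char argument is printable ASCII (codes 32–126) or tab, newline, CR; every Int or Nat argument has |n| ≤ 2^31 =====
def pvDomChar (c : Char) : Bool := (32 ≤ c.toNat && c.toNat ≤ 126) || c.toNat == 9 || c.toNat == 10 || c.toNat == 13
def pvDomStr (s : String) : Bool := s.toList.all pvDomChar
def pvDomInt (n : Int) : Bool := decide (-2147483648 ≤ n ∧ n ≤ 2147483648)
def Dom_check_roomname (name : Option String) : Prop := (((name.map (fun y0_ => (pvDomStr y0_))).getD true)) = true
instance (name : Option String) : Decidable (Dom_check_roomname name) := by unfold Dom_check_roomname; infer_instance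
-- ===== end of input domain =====

set_option maxRecDepth 4000


-- ===== PORT A =====
-- B re-validates with a recursive single-pass DFA (ASCII range classification + early length
-- bail-out at position 48) instead of A's staged length check plus all()-membership scan
-- against a precomputed frozenset. (objective: alternative)
def pvAllowedChars : List Char :=
  ("abcdefghijklmnopqrstuvwxyzABCDEFGHIJKLMNOPQRSTUVWXYZ" ++ "0123456789" ++ "_+-=/ $%#@!?,;()[]").toList

def pvAllowedSet : PySem.Set Char := PySem.Set.ofList pvAllowedChars

def check_roomname (name : Option String) : Option String :=
  match name with
  | none => none
  | some s =>
    if ¬ (4 ≤ PySem.Str.len s ∧ PySem.Str.len s ≤ 48) then none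
    else if ¬ (s.toList.all (fun c => PySem.Set.contains pvAllowedSet c)) then none
    else some s

-- ===== PORT B =====
def pvPunct : List Char := "_+-=/ $%#@!?,;()[]".toList

def pvIsAllowedAlt (c : Char) : Bool :=
  ('a' ≤ c ∧ c ≤ 'z') ∨ ('A' ≤ c ∧ c ≤ 'Z') ∨ ('0' ≤ c ∧ c ≤ '9') ∨ pvPunct.contains c

-- recursive DFA: the characters before position i are already validated; rest = name[i:]
def pvConsume (name : String) (rest : List Char) (i : Nat) : Option String :=
  match rest with
  | [] => if 4 ≤ i ∧ i ≤ 48 then some name else none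
  | c :: cs =>
    if pvIsAllowedAlt c then
      (if i < 48 then pvConsume name cs (i + 1) else none)
    else none

def check_roomname_alt (name : Option String) : Option String :=
  match name with
  | none => none
  | some s => pvConsume s s.toList 0

-- ===== PRECONDITION & SPEC =====
def Spec_check_roomname (name : Option String) (out : Option String) : Prop := out = check_roomname_alt name
instance (name : Option String) (out : Option String) : Decidable (Spec_check_roomname name out) := by unfold Spec_check_roomname; infer_instance

-- ===== CLAIM (what is proved, stated in full; the proofs are below) =====
def Claim_equal_check_roomname : Prop := ∀ (name : Option String), Dom_check_roomname name → Spec_check_roomname name (check_roomname name)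

-- ===== LEMMAS AND PROOFS =====
def pvCodes : List Nat := [97, 98, 99, 100, 101, 102, 103, 104, 105, 106, 107, 108, 109, 110, 111, 112, 113, 114, 115, 116, 117, 118, 119, 120, 121, 122, 65, 66, 67, 68, 69, 70, 71, 72, 73, 74, 75, 76, 77, 78, 79, 80, 81, 82, 83, 84, 85, 86, 87, 88, 89, 90, 48, 49, 50, 51, 52, 53, 54, 55, 56, 57, 95, 43, 45, 61, 47, 32, 36, 37, 35, 64, 33, 63, 44, 59, 40, 41, 91, 93]

def pvPunctCodes : List Nat := [95, 43, 45, 61, 47, 32, 36, 37, 35, 64, 33, 63, 44, 59, 40, 41, 91, 93]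

def pvNatAllowed (n : Nat) : Bool :=
  (97 ≤ n ∧ n ≤ 122) ∨ (65 ≤ n ∧ n ≤ 90) ∨ (48 ≤ n ∧ n ≤ 57) ∨ pvPunctCodes.contains n

theorem pvNatAgree_all :
    (List.range 128).all (fun n => pvNatAllowed n == pvCodes.contains n) = true := by rfl

theorem pvNatAgree (n : Nat) (h : n < 128) : pvNatAllowed n = pvCodes.contains n :=
  beq_iff_eq.mp (List.all_eq_true.mp pvNatAgree_all n (List.mem_range.mpr h))

theorem pvBeq_toNat (c d : Char) : (c.toNat == d.toNat) = (c == d) := by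
  by_cases h : c = d
  · simp [h]
  · have h2 : c.toNat ≠ d.toNat := by
      intro he
      exact h (Char.ext (UInt32.toNat_inj.mp he))
    simp [h, h2]

theorem pvContains_toNat (l : List Char) (c : Char) :
    (l.map Char.toNat).contains c.toNat = l.contains c := by
  induction l with
  | nil => rfl
  | cons d ds ih =>
    simp only [List.map_cons, List.contains_cons, ih, pvBeq_toNat]

theorem pvLe_toNat (c d : Char) : c ≤ d ↔ c.toNat ≤ d.toNat := by
  rw [Char.le_def, UInt32.le_iff_toNat_le]; rfl

theorem pvMapAllowed : pvAllowedChars.map Char.toNat = pvCodes := by rfl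

theorem pvMapPunct : pvPunct.map Char.toNat = pvPunctCodes := by rfl

-- On the domain's characters (code < 128) the DFA's range/punctuation classifier agrees with
-- membership in A's allowed list.
theorem pvAllowed_agree (c : Char) (h : pvDomChar c = true) :
    pvIsAllowedAlt c = pvAllowedChars.contains c := by
  have hlt : c.toNat < 128 := by revert h; simp [pvDomChar]; omega
  have hA : pvAllowedChars.contains c = pvNatAllowed c.toNat := by
    rw [← pvContains_toNat pvAllowedChars c, pvMapAllowed, pvNatAgree c.toNat hlt]
  rw [hA]
  unfold pvIsAllowedAlt pvNatAllowed
  rw [decide_eq_decide, ← pvMapPunct, pvContains_toNat]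
  simp only [pvLe_toNat]
  exact Iff.rfl

theorem pvConsume_eq (name : String) (l : List Char) (i : Nat) :
    pvConsume name l i =
      if l.all pvIsAllowedAlt ∧ 4 ≤ i + l.length ∧ i + l.length ≤ 48 then some name
      else none := by
  induction l generalizing i with
  | nil => simp [pvConsume]
  | cons c cs ih =>
    simp only [pvConsume, List.all_cons, List.length_cons, ih, Bool.and_eq_true]
    by_cases hc : pvIsAllowedAlt c = true
    · simp only [hc, if_true, true_and]
      by_cases hi : i < 48
      · simp only [hi, if_true]
        apply if_congr _ rfl rfl
        constructor <;> rintro ⟨ha, hb, hc'⟩ <;> exact ⟨ha, by omega, by omega⟩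
      · simp only [hi, if_false]
        rw [if_neg]
        rintro ⟨-, -, h5⟩
        omega
    · simp [hc]

-- ===== VERDICT (by name: the statement is the Claim_ definition above) =====
theorem check_roomname_spec : Claim_equal_check_roomname := by
  intro name hdom
  unfold Spec_check_roomname
  cases name with
  | none => rfl
  | some s =>
    have hd : ∀ c ∈ s.toList, pvDomChar c = true := by
      simpa [Dom_check_roomname, pvDomStr, List.all_eq_true] using hdom
    have key : ∀ c ∈ s.toList,
        PySem.Set.contains pvAllowedSet c = pvIsAllowedAlt c := by
      intro c hc
      rw [pvAllowed_agree c (hd c hc), pvAllowedSet,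
        PySem.Set.ofList_eq_self_of_nodup pvAllowedChars (by decide),
        PySem.Set.contains_eq_listContains]
    have hall : s.toList.all (fun c => PySem.Set.contains pvAllowedSet c)
        = s.toList.all pvIsAllowedAlt := by
      rw [Bool.eq_iff_iff, List.all_eq_true, List.all_eq_true]
      constructor <;> intro h c hc
      · rw [← key c hc]; exact h c hc
      · rw [key c hc]; exact h c hc
    simp only [check_roomname, check_roomname_alt, pvConsume_eq, hall, PySem.Str.len_eq,
      Nat.zero_add]
    have hlen : s.toList.length = s.length := by simp
    rw [hlen]
    by_cases hL : 4 ≤ s.length ∧ s.length ≤ 48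
    · rw [if_neg (not_not.mpr ⟨by exact_mod_cast hL.1, by exact_mod_cast hL.2⟩)]
      by_cases hA : s.toList.all pvIsAllowedAlt = true
      · rw [if_neg (not_not.mpr hA), if_pos ⟨hA, hL.1, hL.2⟩]
      · rw [if_pos hA, if_neg]
        rintro ⟨h, -, -⟩
        exact hA h
    · rw [if_pos, if_neg]
      · rintro ⟨-, h4, h5⟩
        exact hL ⟨h4, h5⟩
      · rintro ⟨h1, h2⟩
        exact hL ⟨by exact_mod_cast h1, by exact_mod_cast h2⟩
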